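-- pv_equiv track=rewrite | github.com/landlawd/rtbquerytool | rtbscraper.py | build_floor_sequence
-- ===== SOURCE A (Python) =====
-- def build_floor_sequence(min_floor, max_floor, step):
--     # Build ascending list from min to max using step
--     ascending = list(range(min_floor, max_floor + 1, step))
--
--     # Create outside-in sequence
--     floors = []
--     left = 0
--     right = len(ascending) - 1
--
--     while left <= right:
--         if left == right:
--             floors.append(ascending[left])
--         else:
--             floors.append(ascending[left])
--             floors.append(ascending[right])
--         left += 1
--         right -= 1
--
--     return floors
-- ===== SOURCE B (Python) =====
-- def build_floor_sequence(min_floor, max_floor, step):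
--     # Staged passes: split the ascending list at its midpoint, reverse the back
--     # half, then interleave the two halves pairwise; the lone middle element of
--     # an odd-length list (the front half's extra element) goes last.
--     ascending = list(range(min_floor, max_floor + 1, step))
--     half = (len(ascending) + 1) // 2
--     front = ascending[:half]
--     back = ascending[half:][::-1]
--     floors = []
--     for a, b in zip(front, back):
--         floors.append(a)
--         floors.append(b)
--     if len(back) < len(front):
--         floors.append(front[-1])
--     return floors
-- ===== Notes on version B (the rewrite author's own statement) =====
-- stated objective: alternative
-- what changed: Instead of a converging two-pointer while loop with a left==right special case, B splits the ascending list at its midpoint, reverses the back half, and zips the two halves, interleaving each pair and appending the odd middle element last.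
import Mathlib
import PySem

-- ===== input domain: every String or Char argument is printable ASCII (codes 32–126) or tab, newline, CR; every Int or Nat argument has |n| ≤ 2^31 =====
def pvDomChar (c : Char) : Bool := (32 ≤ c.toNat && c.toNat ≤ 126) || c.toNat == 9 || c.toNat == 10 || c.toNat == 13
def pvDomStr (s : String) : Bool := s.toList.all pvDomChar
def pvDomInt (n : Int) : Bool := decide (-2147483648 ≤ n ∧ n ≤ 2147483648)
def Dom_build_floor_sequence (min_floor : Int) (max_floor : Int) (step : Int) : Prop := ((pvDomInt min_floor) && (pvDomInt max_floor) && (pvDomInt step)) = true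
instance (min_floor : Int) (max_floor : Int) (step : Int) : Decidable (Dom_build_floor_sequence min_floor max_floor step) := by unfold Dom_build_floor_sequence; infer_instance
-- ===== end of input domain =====

-- B replaces A's converging two-pointer loop by staged passes: split the ascending
-- list at its midpoint, reverse the back half, zip-interleave the halves (objective: alternative).

-- ===== PORT A =====
-- the while loop: left/right pointers converge; indices are always in range, so pyGetD's default is never used
def pyLoopA (asc : List Int) (l r : Int) : List Int :=
  if l ≤ r then
    (if l = r then [PySem.List.pyGetD asc l 0]
     else [PySem.List.pyGetD asc l 0, PySem.List.pyGetD asc r 0]) ++ pyLoopA asc (l + 1) (r - 1)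
  else []
termination_by (r + 1 - l).toNat
decreasing_by omega

def build_floor_sequence (min_floor : Int) (max_floor : Int) (step : Int) : List Int :=
  let ascending := PySem.List.pyRange min_floor (max_floor + 1) step
  pyLoopA ascending 0 ((ascending.length : Int) - 1)

-- ===== PORT B =====
def build_floor_sequence_alt (min_floor : Int) (max_floor : Int) (step : Int) : List Int :=
  let ascending := PySem.List.pyRange min_floor (max_floor + 1) step
  let half := PySem.Int.floordiv ((ascending.length : Int) + 1) 2
  let front := PySem.List.slice ascending none (some half)
  let back := (PySem.List.slice ascending (some half) none).reverse   -- ascending[half:][::-1]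
  let floors := (front.zip back).foldl (fun acc p => acc ++ [p.1, p.2]) []
  if back.length < front.length then floors ++ [PySem.List.pyGetD front (-1) 0] else floors

-- ===== PRECONDITION & SPEC =====
-- Python's range raises ValueError when step == 0; excluded here.
def Pre_build_floor_sequence (min_floor : Int) (max_floor : Int) (step : Int) : Prop := step ≠ 0
instance (min_floor : Int) (max_floor : Int) (step : Int) : Decidable (Pre_build_floor_sequence min_floor max_floor step) := by unfold Pre_build_floor_sequence; infer_instance
def pvWitness_build_floor_sequence : Int × Int × Int := (1, 7, 2)

def Spec_build_floor_sequence (min_floor : Int) (max_floor : Int) (step : Int) (out : List Int) : Prop := out = build_floor_sequence_alt min_floor max_floor step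
instance (min_floor : Int) (max_floor : Int) (step : Int) (out : List Int) : Decidable (Spec_build_floor_sequence min_floor max_floor step out) := by unfold Spec_build_floor_sequence; infer_instance

-- ===== CLAIM (what is proved, stated in full; the proofs are below) =====
def Claim_equal_build_floor_sequence : Prop := ∀ (min_floor : Int) (max_floor : Int) (step : Int), Dom_build_floor_sequence min_floor max_floor step → Pre_build_floor_sequence min_floor max_floor step → Spec_build_floor_sequence min_floor max_floor step (build_floor_sequence min_floor max_floor step)

-- ===== LEMMAS AND PROOFS =====

-- loop invariant: from pointers (k, n-1-k) the loop output equals the interleaving of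
-- the not-yet-consumed prefixes of the two halves, plus the odd middle element.
lemma loop_zip (asc : List Int) : ∀ (m k : Nat), 2 * k ≤ asc.length → asc.length - 2 * k = m →
    pyLoopA asc (k : Int) ((asc.length : Int) - 1 - (k : Int)) =
      (((asc.take ((asc.length + 1) / 2)).drop k).zip
        (((asc.drop ((asc.length + 1) / 2)).reverse).drop k)).flatMap (fun p => [p.1, p.2])
      ++ (if ((asc.drop ((asc.length + 1) / 2)).reverse).length < (asc.take ((asc.length + 1) / 2)).length
          then [asc.getD ((asc.length + 1) / 2 - 1) 0] else []) := by
  intro m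
  induction m using Nat.strong_induction_on with
  | _ m IH =>
    intro k hk hm
    set n := asc.length with hn
    set h := (n + 1) / 2 with hh
    have hlen_front : (asc.take h).length = min h n := by simp [hn]
    have hlen_back : ((asc.drop h).reverse).length = n - h := by simp [hn]
    match m, hm with
    | 0, hm =>
      -- n = 2*k: loop is done, both halves fully consumed, n even so no middle element
      have hn2k : n = 2 * k := by omega
      have hfe : (asc.take h).drop k = [] := by
        apply List.drop_eq_nil_of_le; omega
      have hbe : ((asc.drop h).reverse).drop k = [] := by
        apply List.drop_eq_nil_of_le; omega
      rw [pyLoopA, if_neg (by omega), hfe, hbe]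
      rw [if_neg (by omega)]
      simp
    | 1, hm =>
      -- n = 2*k + 1: left == right, the lone middle element; h = k + 1
      have hn2k : n = 2 * k + 1 := by omega
      have hhk : h = k + 1 := by omega
      have hkr : ((n : Int) - 1 - (k : Int)) = (k : Int) := by omega
      rw [pyLoopA, hkr, if_pos le_rfl, if_pos rfl]
      rw [pyLoopA, if_neg (by omega)]
      have hbe : ((asc.drop h).reverse).drop k = [] := by
        apply List.drop_eq_nil_of_le; omega
      rw [hbe, List.zip_nil_right]
      rw [if_pos (by omega)]
      have hkn : k < n := by omega
      simp only [List.flatMap_nil, List.nil_append, List.append_nil,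
        PySem.List.pyGetD_natCast, List.cons.injEq, and_true]
      rw [List.getD_eq_getElem _ _ (by omega), List.getD_eq_getElem _ _ (by omega)]
      congr 1; omega
    | (t + 2), hm =>
      -- left < right: emit asc[k] and asc[n-1-k], recurse with k+1
      have h2 : 2 * k + 2 ≤ n := by omega
      have hkh : k < (asc.take h).length := by omega
      have hkb : k < ((asc.drop h).reverse).length := by omega
      rw [pyLoopA, if_pos (by omega), if_neg (by omega)]
      have hrec : pyLoopA asc ((k : Int) + 1) ((n : Int) - 1 - (k : Int) - 1)
          = pyLoopA asc (((k + 1 : Nat)) : Int) ((n : Int) - 1 - ((k + 1 : Nat) : Int)) := by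
        push_cast; ring_nf
      rw [hrec, IH t (by omega) (k + 1) (by omega) (by omega)]
      rw [List.drop_eq_getElem_cons hkh, List.drop_eq_getElem_cons hkb, List.zip_cons_cons]
      have hfk : (asc.take h)[k] = asc[k]'(by omega) := List.getElem_take
      have hdl : (asc.drop h).length = n - h := by simp [hn]
      have hbk : ((asc.drop h).reverse)[k] = asc[n - 1 - k]'(by omega) := by
        rw [List.getElem_reverse]
        simp only [List.length_drop]
        rw [List.getElem_drop]
        congr 1; omega
      have hg1 : PySem.List.pyGetD asc (k : Int) 0 = asc[k]'(by omega) := by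
        rw [PySem.List.pyGetD_natCast, List.getD_eq_getElem _ _ (by omega)]
      have hg2 : PySem.List.pyGetD asc ((n : Int) - 1 - (k : Int)) 0 = asc[n - 1 - k]'(by omega) := by
        have hc : ((n : Int) - 1 - (k : Int)) = ((n - 1 - k : Nat) : Int) := by omega
        rw [hc, PySem.List.pyGetD_natCast, List.getD_eq_getElem _ _ (by omega)]
      simp only [List.flatMap_cons, hfk, hbk, hg1, hg2, List.cons_append, List.nil_append]

-- front[-1] (guarded by back < front) is the last element of the front half
lemma front_neg_one (asc : List Int)
    (hne : ((asc.drop ((asc.length + 1) / 2)).reverse).length < (asc.take ((asc.length + 1) / 2)).length) :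
    PySem.List.pyGetD (asc.take ((asc.length + 1) / 2)) (-1) 0
      = asc.getD ((asc.length + 1) / 2 - 1) 0 := by
  set n := asc.length with hn
  set h := (n + 1) / 2 with hh
  simp only [List.length_reverse, List.length_drop, List.length_take] at hne
  have hnz : asc.take h ≠ [] := by
    intro he
    have hlen := List.length_take (i := h) (l := asc)
    rw [he] at hlen
    simp only [List.length_nil, ← hn] at hlen
    omega
  rw [PySem.List.pyGetD_neg_one _ _ hnz, List.getLast_eq_getElem]
  have hlen : (asc.take h).length = min h n := by simp [hn]
  rw [List.getElem_take, List.getD_eq_getElem _ _ (by omega)]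
  congr 1; omega

-- ===== VERDICT (by name: the statement is the Claim_ definition above) =====
theorem build_floor_sequence_spec : Claim_equal_build_floor_sequence := by
  intro min_floor max_floor step _ _
  unfold Spec_build_floor_sequence build_floor_sequence build_floor_sequence_alt
  set asc := PySem.List.pyRange min_floor (max_floor + 1) step with hasc
  dsimp only
  -- normalise B's slices and floordiv to take/drop over Nat indices
  have hhalf : PySem.Int.floordiv ((asc.length : Int) + 1) 2 = (((asc.length + 1) / 2 : Nat) : Int) := by
    have : ((asc.length : Int) + 1) = (((asc.length + 1 : Nat)) : Int) := by push_cast; ring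
    rw [this]
    exact_mod_cast PySem.Int.floordiv_natCast (asc.length + 1) 2
  rw [hhalf, PySem.List.slice_to_natCast, PySem.List.slice_from_natCast,
      PySem.List.foldl_append_eq_flatMap, List.nil_append]
  have h := loop_zip asc (asc.length) 0 (by omega) (by omega)
  simp only [Nat.cast_zero, sub_zero, List.drop_zero] at h
  rw [h]
  split_ifs with hc
  · rw [front_neg_one asc hc]
  · rw [List.append_nil]
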